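-- pv_equiv track=rewrite | github.com/ProgrammerXX1/AFM | layer-Back/app/ml/Embed/chunker.py | merge_short_blocks
-- ===== SOURCE A (Python) =====
-- def merge_short_blocks(blocks: list[str], min_length: int = 150) -> list[str]:
--     merged = []
--     buffer = ""
--     for block in blocks:
--         if len(block) < min_length:
--             buffer += " " + block
--         else:
--             if buffer:
--                 merged.append(buffer.strip())
--                 buffer = ""
--             merged.append(block)
--     if buffer:
--         merged.append(buffer.strip())
--     return merged
-- ===== SOURCE B (Python) =====
-- def merge_short_blocks(blocks: list[str], min_length: int = 150) -> list[str]: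
--     merged = []
--     n = len(blocks)
--     i = 0
--     while i < n:
--         if len(blocks[i]) < min_length:
--             j = i + 1
--             while j < n and len(blocks[j]) < min_length:
--                 j += 1
--             merged.append(" ".join(blocks[i:j]).strip())
--             i = j
--         else:
--             merged.append(blocks[i])
--             i += 1
--     return merged
-- ===== Notes on version B (the rewrite author's own statement) =====
-- stated objective: alternative
-- what changed: Replaced the running string-buffer state machine with an index scan that detects each maximal run of short blocks with an inner pointer and emits ' '.join(run).strip() for it, appending long blocks directly; no mutable buffer string is carried between iterations.
import Mathlib
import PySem

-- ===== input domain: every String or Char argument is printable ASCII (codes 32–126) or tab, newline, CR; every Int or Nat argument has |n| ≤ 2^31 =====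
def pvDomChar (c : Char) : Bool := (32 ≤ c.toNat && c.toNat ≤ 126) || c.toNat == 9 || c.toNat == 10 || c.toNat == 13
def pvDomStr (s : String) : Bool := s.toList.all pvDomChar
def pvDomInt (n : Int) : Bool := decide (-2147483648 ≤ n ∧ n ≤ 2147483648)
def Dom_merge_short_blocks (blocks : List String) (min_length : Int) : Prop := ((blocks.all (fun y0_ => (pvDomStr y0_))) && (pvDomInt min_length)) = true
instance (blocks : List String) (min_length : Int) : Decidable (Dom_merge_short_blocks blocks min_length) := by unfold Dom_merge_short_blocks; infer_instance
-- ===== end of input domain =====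

-- B replaces A's running string-buffer state machine by a run-detecting scan (maximal run of
-- short blocks -> one joined-and-stripped output); same result, a different decomposition.

-- ===== PORT A =====
def merge_short_blocks (blocks : List String) (min_length : Int) : List String :=
  let st := blocks.foldl
    (fun (st : List String × String) block =>
      if PySem.Str.len block < min_length then
        (st.1, st.2 ++ " " ++ block)
      else
        ((if st.2 ≠ "" then st.1 ++ [PySem.Str.strip st.2] else st.1) ++ [block], ""))
    ([], "")
  if st.2 ≠ "" then st.1 ++ [PySem.Str.strip st.2] else st.1

-- ===== PORT B =====
-- the outer while loop of Source B: at a short block, the inner while (takeWhile) finds the end of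
-- the run of short blocks, one joined+stripped string is emitted and the scan resumes after it
def msbGo (min_length : Int) : List String → List String
  | [] => []
  | b :: rest =>
    if PySem.Str.len b < min_length then
      PySem.Str.strip (PySem.Str.join " "
          (b :: rest.takeWhile (fun x => decide (PySem.Str.len x < min_length))))
        :: msbGo min_length (rest.dropWhile (fun x => decide (PySem.Str.len x < min_length)))
    else
      b :: msbGo min_length rest
termination_by l => l.length
decreasing_by
  · exact Nat.lt_succ_of_le (List.length_dropWhile_le _ rest)
  · exact Nat.lt_succ_of_le (Nat.le_refl _)

def merge_short_blocks_alt (blocks : List String) (min_length : Int) : List String :=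
  msbGo min_length blocks

-- ===== PRECONDITION & SPEC =====
def Spec_merge_short_blocks (blocks : List String) (min_length : Int) (out : List String) : Prop := out = merge_short_blocks_alt blocks min_length
instance (blocks : List String) (min_length : Int) (out : List String) : Decidable (Spec_merge_short_blocks blocks min_length out) := by unfold Spec_merge_short_blocks; infer_instance

-- ===== CLAIM (what is proved, stated in full; the proofs are below) =====
def Claim_equal_merge_short_blocks : Prop := ∀ (blocks : List String) (min_length : Int), Dom_merge_short_blocks blocks min_length → Spec_merge_short_blocks blocks min_length (merge_short_blocks blocks min_length)

-- ===== LEMMAS AND PROOFS =====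

-- A's loop, written as structural recursion over the remaining blocks with the buffer as state
def goA (m : Int) (buffer : String) : List String → List String
  | [] => if buffer ≠ "" then [PySem.Str.strip buffer] else []
  | b :: rest =>
    if PySem.Str.len b < m then goA m (buffer ++ " " ++ b) rest
    else (if buffer ≠ "" then [PySem.Str.strip buffer] else []) ++ b :: goA m "" rest

lemma strip_space_append (t : String) : PySem.Str.strip (" " ++ t) = PySem.Str.strip t := by
  rw [← String.toList_inj]
  have hsp : PySem.Chars.isspace ' ' = true := by decide
  simp [PySem.Str.toList_strip, String.toList_append, PySem.Chars.strip, PySem.Chars.lstrip,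
    hsp]

lemma space_append_ne (t : String) : (" " ++ t) ≠ "" := by
  intro h
  have h2 := congrArg String.toList h
  simp [String.toList_append] at h2

lemma chars_join_append_singleton (sep : List Char) (ps : List (List Char)) (cs : List Char)
    (h : ps ≠ []) :
    PySem.Chars.join sep (ps ++ [cs]) = PySem.Chars.join sep ps ++ sep ++ cs := by
  induction ps with
  | nil => exact absurd rfl h
  | cons a t ih =>
    cases t with
    | nil => simp [PySem.Chars.join_cons_cons, PySem.Chars.join_singleton]
    | cons a2 t2 =>
      have hrw : (a2 :: t2) ++ [cs] = a2 :: (t2 ++ [cs]) := rfl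
      calc PySem.Chars.join sep ((a :: a2 :: t2) ++ [cs])
          = a ++ sep ++ PySem.Chars.join sep ((a2 :: t2) ++ [cs]) := by
            rw [List.cons_append, hrw, PySem.Chars.join_cons_cons]
        _ = a ++ sep ++ (PySem.Chars.join sep (a2 :: t2) ++ sep ++ cs) := by
            rw [ih (by simp)]
        _ = PySem.Chars.join sep (a :: a2 :: t2) ++ sep ++ cs := by
            rw [PySem.Chars.join_cons_cons]; simp [List.append_assoc]

lemma str_join_append_singleton (run : List String) (b : String) (h : run ≠ []) :
    PySem.Str.join " " (run ++ [b]) = PySem.Str.join " " run ++ " " ++ b := by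
  rw [← String.toList_inj]
  simp only [PySem.Str.toList_join, String.toList_append, List.map_append, List.map_cons,
    List.map_nil]
  exact chars_join_append_singleton _ _ _ (by simpa using h)

lemma str_join_singleton (b : String) : PySem.Str.join " " [b] = b := by
  rw [← String.toList_inj]
  simp [PySem.Str.toList_join, PySem.Chars.join_singleton]

lemma foldA (m : Int) (blocks : List String) :
    ∀ (merged : List String) (buffer : String),
    (let st := blocks.foldl
        (fun (st : List String × String) block =>
          if PySem.Str.len block < m then
            (st.1, st.2 ++ " " ++ block)
          else
            ((if st.2 ≠ "" then st.1 ++ [PySem.Str.strip st.2] else st.1) ++ [block], ""))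
        (merged, buffer);
      if st.2 ≠ "" then st.1 ++ [PySem.Str.strip st.2] else st.1)
      = merged ++ goA m buffer blocks := by
  induction blocks with
  | nil =>
    intro merged buffer
    simp only [List.foldl_nil, goA]
    split_ifs <;> simp
  | cons b rest ih =>
    intro merged buffer
    simp only [List.foldl_cons]
    by_cases h : PySem.Str.len b < m
    · simp only [h, if_pos, goA]
      exact ih merged (buffer ++ " " ++ b)
    · simp only [h, if_neg, goA, not_false_iff]
      rw [ih]
      split_ifs <;> simp [List.append_assoc]

lemma mainAux (m : Int) : ∀ (n : Nat) (blocks : List String), blocks.length ≤ n →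
    (goA m "" blocks = msbGo m blocks) ∧
    (∀ run : List String, run ≠ [] →
      goA m (" " ++ PySem.Str.join " " run) blocks =
        PySem.Str.strip (PySem.Str.join " "
            (run ++ blocks.takeWhile (fun x => decide (PySem.Str.len x < m))))
          :: msbGo m (blocks.dropWhile (fun x => decide (PySem.Str.len x < m)))) := by
  intro n
  induction n with
  | zero =>
    intro blocks hlen
    have hb : blocks = [] := List.eq_nil_of_length_eq_zero (Nat.le_zero.mp hlen)
    subst hb
    refine ⟨by simp [goA, msbGo], ?_⟩
    intro run hrun
    simp [goA, msbGo, strip_space_append]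
  | succ n ih =>
    intro blocks hlen
    cases blocks with
    | nil =>
      refine ⟨by simp [goA, msbGo], ?_⟩
      intro run hrun
      simp [goA, msbGo, strip_space_append]
    | cons b rest =>
      have hrest : rest.length ≤ n := by simpa using hlen
      have hdrop : (rest.dropWhile (fun x => decide (PySem.Str.len x < m))).length ≤ n :=
        le_trans (List.length_dropWhile_le _ _) hrest
      constructor
      · by_cases h : PySem.Str.len b < m
        · simp only [goA, h, if_pos, msbGo]
          have e1 : ("" : String) ++ " " ++ b = " " ++ PySem.Str.join " " [b] := by
            rw [str_join_singleton]; simp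
          rw [e1, (ih rest hrest).2 [b] (by simp)]
          simp
        · simp only [goA, h, if_neg, msbGo, not_false_iff]
          rw [(ih rest hrest).1]
          simp
      · intro run hrun
        by_cases h : PySem.Str.len b < m
        · simp only [goA, h, if_pos]
          have e1 : (" " ++ PySem.Str.join " " run) ++ " " ++ b
              = " " ++ PySem.Str.join " " (run ++ [b]) := by
            rw [str_join_append_singleton run b hrun, ← String.append_assoc,
              ← String.append_assoc]
          rw [e1, (ih rest hrest).2 (run ++ [b]) (by simp)]
          have h' : (↑b.length : Int) < m := by simpa using h
          simp [h', List.append_assoc]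
        · simp only [goA, h, if_neg, not_false_iff]
          rw [(ih rest hrest).1]
          have hne : (" " ++ PySem.Str.join " " run) ≠ "" := space_append_ne _
          have h' : ¬ (↑b.length : Int) < m := by simpa using h
          simp [hne, h', msbGo, strip_space_append]

-- ===== VERDICT (by name: the statement is the Claim_ definition above) =====
theorem merge_short_blocks_spec : Claim_equal_merge_short_blocks := by
  intro blocks m _
  unfold Spec_merge_short_blocks merge_short_blocks merge_short_blocks_alt
  rw [foldA m blocks [] ""]
  simpa using (mainAux m blocks.length blocks le_rfl).1
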